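-- pv_equiv track=rewrite | github.com/100-hours-a-week/3-team-Tasteam-data-seeder | pipeline.py | map_periods_to_weekly
-- ===== SOURCE A (Python) =====
-- from typing import Dict, List, Optional, Tuple, Any
--
-- def map_periods_to_weekly(periods: List[dict]) -> Dict[int, Tuple[Optional[str], Optional[str], bool]]:
--     # Google: day 0=Sunday ... 6=Saturday
--     # DML: day_of_week 1=Mon ... 7=Sun
--     day_map = {0: 7, 1: 1, 2: 2, 3: 3, 4: 4, 5: 5, 6: 6}
--     by_day: Dict[int, Tuple[str, Optional[str]]] = {}
--     for p in periods:
--         o = p.get("open")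
--         c = p.get("close")
--         if not o:
--             continue
--         day = o.get("day")
--         if day is None or day in by_day:
--             continue
--         open_time = f"{o.get('hour', 0):02d}:{o.get('minute', 0):02d}"
--         close_time = None
--         if c:
--             close_time = f"{c.get('hour', 0):02d}:{c.get('minute', 0):02d}"
--         by_day[day] = (open_time, close_time)
--
--     weekly: Dict[int, Tuple[Optional[str], Optional[str], bool]] = {}
--     for g_day, d_day in day_map.items():
--         if g_day in by_day:
--             weekly[d_day] = (*by_day[g_day], False)
--         else:
--             weekly[d_day] = (None, None, True)
--     return weekly
-- ===== SOURCE B (Python) =====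
-- def map_periods_to_weekly(periods):
--     # No intermediate by_day index: for each weekday, scan periods for the
--     # first entry whose truthy "open" has day == g_day.
--     day_map = {0: 7, 1: 1, 2: 2, 3: 3, 4: 4, 5: 5, 6: 6}
--
--     def entry(g_day):
--         for p in periods:
--             o = p.get("open")
--             if o and o.get("day") == g_day:
--                 open_time = f"{o.get('hour', 0):02d}:{o.get('minute', 0):02d}"
--                 c = p.get("close")
--                 close_time = f"{c.get('hour', 0):02d}:{c.get('minute', 0):02d}" if c else None
--                 return (open_time, close_time, False)
--         return (None, None, True)
--
--     return {d_day: entry(g_day) for g_day, d_day in day_map.items()}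
-- ===== Notes on version B (the rewrite author's own statement) =====
-- stated objective: alternative
-- what changed: B drops A's intermediate by_day dict entirely: it builds the weekly dict in one comprehension over day_map, finding each weekday's entry by a direct first-match scan of periods.
import Mathlib
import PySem

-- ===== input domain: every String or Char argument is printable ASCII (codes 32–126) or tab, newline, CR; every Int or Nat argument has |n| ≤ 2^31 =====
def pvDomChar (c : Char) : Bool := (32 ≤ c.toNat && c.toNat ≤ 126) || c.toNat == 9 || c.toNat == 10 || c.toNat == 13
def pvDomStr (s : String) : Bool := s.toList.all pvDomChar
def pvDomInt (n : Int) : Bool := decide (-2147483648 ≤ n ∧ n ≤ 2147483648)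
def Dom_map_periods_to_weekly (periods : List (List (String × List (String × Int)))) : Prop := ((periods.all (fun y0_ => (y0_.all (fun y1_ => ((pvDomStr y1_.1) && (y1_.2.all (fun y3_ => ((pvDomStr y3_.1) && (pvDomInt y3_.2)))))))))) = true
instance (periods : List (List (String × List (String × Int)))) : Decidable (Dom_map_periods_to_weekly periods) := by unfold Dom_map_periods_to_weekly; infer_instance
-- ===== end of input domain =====

-- B replaces A's intermediate by_day dict with a per-weekday first-match scan of the periods list (alternative decomposition, same result).


-- shared primitives (dict .get and the f"{..:02d}" time format, used verbatim by both Pythons)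
def pvGetI (m : List (String × Int)) (k : String) : Option Int :=
  (m.find? (fun q => q.1 == k)).map (·.2)
def pvGetD' (p : List (String × List (String × Int))) (k : String) : Option (List (String × Int)) :=
  (p.find? (fun q => q.1 == k)).map (·.2)
-- f"{n:02d}": zero-pad to width 2 (sign counts towards the width, exactly as Python pads)
def pvFmt02 (n : Int) : String :=
  if 0 ≤ n ∧ n < 10 then "0" ++ PySem.Int.toStr n
  else if -10 < n ∧ n < 0 then PySem.Int.toStr n
  else PySem.Int.toStr n
def pvHM (m : List (String × Int)) : String :=
  pvFmt02 ((pvGetI m "hour").getD 0) ++ ":" ++ pvFmt02 ((pvGetI m "minute").getD 0)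
def pvCloseTime (p : List (String × List (String × Int))) : Option String :=
  match pvGetD' p "close" with
  | some c => if c = [] then none else some (pvHM c)
  | none => none
def pvDayMap : List (Int × Int) := [(0, 7), (1, 1), (2, 2), (3, 3), (4, 4), (5, 5), (6, 6)]

-- ===== PORT A =====
-- the body of A's first loop
def pvAStep (bd : PySem.Dict Int (String × Option String))
    (p : List (String × List (String × Int))) : PySem.Dict Int (String × Option String) :=
  match pvGetD' p "open" with
  | none => bd
  | some o =>
    if o = [] then bd
    else
      match pvGetI o "day" with
      | none => bd
      | some day =>
        if PySem.Dict.contains bd day then bd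
        else PySem.Dict.insert bd day (pvHM o, pvCloseTime p)

-- 'weekly[d_day] = (*by_day[g_day], False) if g_day in by_day else (None, None, True)'
def pvWeekEntry (bd : PySem.Dict Int (String × Option String)) (g : Int) :
    Option String × Option String × Bool :=
  match PySem.Dict.get? bd g with
  | some (ot, ct) => (some ot, ct, false)
  | none => (none, none, true)

def map_periods_to_weekly (periods : List (List (String × List (String × Int)))) : List (Int × Option String × Option String × Bool) :=
  let by_day := periods.foldl pvAStep PySem.Dict.empty
  (pvDayMap.foldl (fun w q => PySem.Dict.insert w q.2 (pvWeekEntry by_day q.1)) PySem.Dict.empty).items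

-- ===== PORT B =====
-- B's inner 'for p in periods: … return … / return (None, None, True)'
def pvBScan (g : Int) : List (List (String × List (String × Int))) → Option String × Option String × Bool
  | [] => (none, none, true)
  | p :: rest =>
    match pvGetD' p "open" with
    | some o =>
      if o ≠ [] ∧ pvGetI o "day" = some g then (some (pvHM o), pvCloseTime p, false)
      else pvBScan g rest
    | none => pvBScan g rest

def map_periods_to_weekly_alt (periods : List (List (String × List (String × Int)))) : List (Int × Option String × Option String × Bool) :=
  pvDayMap.map (fun q => (q.2, pvBScan q.1 periods))

-- ===== PRECONDITION & SPEC =====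
def Spec_map_periods_to_weekly (periods : List (List (String × List (String × Int)))) (out : List (Int × Option String × Option String × Bool)) : Prop := out = map_periods_to_weekly_alt periods
instance (periods : List (List (String × List (String × Int)))) (out : List (Int × Option String × Option String × Bool)) : Decidable (Spec_map_periods_to_weekly periods out) := by unfold Spec_map_periods_to_weekly; infer_instance

-- ===== CLAIM (what is proved, stated in full; the proofs are below) =====
def Claim_equal_map_periods_to_weekly : Prop := ∀ (periods : List (List (String × List (String × Int)))), Dom_map_periods_to_weekly periods → Spec_map_periods_to_weekly periods (map_periods_to_weekly periods)

-- ===== LEMMAS AND PROOFS =====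

-- B's scan, as an Option: what the first matching period contributes for day g
def pvScanOpt (g : Int) : List (List (String × List (String × Int))) → Option (String × Option String)
  | [] => none
  | p :: rest =>
    match pvGetD' p "open" with
    | some o =>
      if o ≠ [] ∧ pvGetI o "day" = some g then some (pvHM o, pvCloseTime p)
      else pvScanOpt g rest
    | none => pvScanOpt g rest

theorem pvBScan_eq_scanOpt (g : Int) (l : List (List (String × List (String × Int)))) :
    pvBScan g l = match pvScanOpt g l with
      | some (ot, ct) => (some ot, ct, false)
      | none => (none, none, true) := by
  induction l with
  | nil => rfl
  | cons p rest ih =>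
    simp only [pvBScan, pvScanOpt]
    cases h : pvGetD' p "open" with
    | none => exact ih
    | some o =>
      by_cases hc : o ≠ [] ∧ pvGetI o "day" = some g
      · simp [hc]
      · simp [hc, ih]

theorem pvFold_get (g : Int) (l : List (List (String × List (String × Int))))
    (bd : PySem.Dict Int (String × Option String)) :
    PySem.Dict.get? (l.foldl pvAStep bd) g = (PySem.Dict.get? bd g).or (pvScanOpt g l) := by
  induction l generalizing bd with
  | nil => simp [pvScanOpt]
  | cons p rest ih =>
    rw [List.foldl_cons, ih]
    simp only [pvScanOpt, pvAStep]
    cases hop : pvGetD' p "open" with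
    | none => rfl
    | some o =>
      by_cases ho : o = []
      · simp [ho]
      · simp only [if_neg ho]
        cases hd : pvGetI o "day" with
        | none =>
          simp
        | some d =>
          by_cases hct : PySem.Dict.contains bd d
          · simp only [if_pos hct]
            by_cases hgd : d = g
            · subst hgd
              have hs : (PySem.Dict.get? bd d).isSome := by
                rw [← PySem.Dict.contains_eq_isSome_get?]; exact hct
              cases hbd : PySem.Dict.get? bd d with
              | none => rw [hbd] at hs; simp at hs
              | some v => simp
            · simp only [Option.some.injEq]
              rw [if_neg (fun h => hgd h.2)]
          · simp only [if_neg hct]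
            by_cases hgd : g = d
            · subst hgd
              have hnone : PySem.Dict.get? bd g = none := by
                rw [PySem.Dict.get?_eq_none_iff_contains]; simpa using hct
              have hcond : (o ≠ [] ∧ pvGetI o "day" = some g) := ⟨ho, hd⟩
              simp [hcond, PySem.Dict.get?_insert_self, hnone]
            · simp only [Option.some.injEq]
              rw [PySem.Dict.get?_insert_of_ne _ _ hgd,
                if_neg (fun h => hgd h.2.symm)]

theorem pvWeekEntry_eq (periods : List (List (String × List (String × Int)))) (g : Int) :
    pvWeekEntry (periods.foldl pvAStep PySem.Dict.empty) g = pvBScan g periods := by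
  rw [pvBScan_eq_scanOpt]
  unfold pvWeekEntry
  rw [pvFold_get]
  simp [PySem.Dict.get?_empty]

-- ===== VERDICT (by name: the statement is the Claim_ definition above) =====
theorem map_periods_to_weekly_spec : Claim_equal_map_periods_to_weekly := by
  intro periods _
  unfold Spec_map_periods_to_weekly map_periods_to_weekly map_periods_to_weekly_alt
  have h := PySem.Dict.items_foldl_insert_fresh (l := pvDayMap)
      (k := fun q : Int × Int => q.2)
      (v := fun q : Int × Int => pvWeekEntry (periods.foldl pvAStep PySem.Dict.empty) q.1)
      (d := PySem.Dict.empty)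
      (by intro a _; exact PySem.Dict.contains_empty _)
      (by decide)
  rw [h]
  simp only [PySem.Dict.empty, List.nil_append]
  exact List.map_congr_left (fun q _ => congrArg (Prod.mk q.2) (pvWeekEntry_eq periods q.1))
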